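-- pv_equiv track=rewrite | github.com/zmusaddique/advent_of_code | day4/solution2.py | find_rolls
-- ===== SOURCE A (Python) =====
-- def find_rolls(grid: list[list]):
--     optimal_rolls = 0
--     optimal_rolls_pos = []
--
--     relative_pos = [
--         (-1, -1),
--         (-1, 0),
--         (-1, 1),
--         (0, 1),
--         (1, 1),
--         (1, 0),
--         (1, -1),
--         (0, -1),
--     ]
--     rows = len(grid)
--     cols = len(grid[0])
--
--     for row in range(rows):
--         for col in range(cols):
--             if grid[row][col] == "@":
--                 adj_rolls = 0
--
--                 for dr, dc in relative_pos:
--                     rr = row + dr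
--                     cc = col + dc
--
--                     if 0 <= rr < rows and 0 <= cc < cols:
--                         if grid[rr][cc] == "@":
--                             adj_rolls += 1
--                             if adj_rolls > 3:
--                                 break
--                 if adj_rolls < 4:
--                     optimal_rolls += 1
--                     optimal_rolls_pos.append((row, col))
--
--     return optimal_rolls, optimal_rolls_pos
-- ===== SOURCE B (Python) =====
-- def find_rolls(grid: list[list]):
--     # Scatter/push neighbour counting: one pass increments a dict of counts at
--     # each in-bounds neighbour of every "@" cell, then a row-major pass collects
--     # the "@" cells whose accumulated count is < 4.
--     rows = len(grid)
--     cols = len(grid[0])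
--     offsets = [
--         (-1, -1),
--         (-1, 0),
--         (-1, 1),
--         (0, 1),
--         (1, 1),
--         (1, 0),
--         (1, -1),
--         (0, -1),
--     ]
--     counts = {}
--     for r in range(rows):
--         for c in range(cols):
--             if grid[r][c] == "@":
--                 for dr, dc in offsets:
--                     rr = r + dr
--                     cc = c + dc
--                     if 0 <= rr < rows and 0 <= cc < cols:
--                         counts[(rr, cc)] = counts.get((rr, cc), 0) + 1
--
--     total = 0
--     positions = []
--     for r in range(rows):
--         for c in range(cols):
--             if grid[r][c] == "@" and counts.get((r, c), 0) < 4: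
--                 total += 1
--                 positions.append((r, c))
--     return total, positions
-- ===== Notes on version B (the rewrite author's own statement) =====
-- stated objective: alternative
-- what changed: Replaces A's per-cell gather (inner 8-neighbour scan with an early break for every '@' cell) by a scatter pass that pushes +1 into a dict of neighbour counts from each '@' cell once, followed by a plain row-major collection pass over the precomputed counts.
import Mathlib
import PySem

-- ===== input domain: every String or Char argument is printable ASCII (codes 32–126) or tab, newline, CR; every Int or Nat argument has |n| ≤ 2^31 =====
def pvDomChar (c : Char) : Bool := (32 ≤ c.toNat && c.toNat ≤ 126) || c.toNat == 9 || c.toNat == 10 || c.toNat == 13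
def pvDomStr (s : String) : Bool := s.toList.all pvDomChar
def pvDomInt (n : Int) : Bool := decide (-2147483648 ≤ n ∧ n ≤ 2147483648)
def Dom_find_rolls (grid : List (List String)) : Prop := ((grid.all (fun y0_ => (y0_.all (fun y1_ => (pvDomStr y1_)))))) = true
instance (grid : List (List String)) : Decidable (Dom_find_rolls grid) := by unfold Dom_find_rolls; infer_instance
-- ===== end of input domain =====

-- B replaces A's per-cell gather (inner 8-neighbour scan with early break) by a scatter pass
-- that pushes +1 into a dict of neighbour counts from each '@' cell, then a plain collection pass.

-- ===== PORT A =====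
-- the 8 relative positions, in A's order
def pvOffsets : List (Int × Int) :=
  [(-1, -1), (-1, 0), (-1, 1), (0, 1), (1, 1), (1, 0), (1, -1), (0, -1)]

-- grid[r][c]; both Pythons only evaluate it with 0 ≤ r < len(grid) and 0 ≤ c (< len of the row
-- under Pre_), where List.getD with toNat is exact; the "" default is never reached inside Pre_.
def pvCell (grid : List (List String)) (r c : Int) : String :=
  (grid.getD r.toNat []).getD c.toNat ""

-- A's inner `for dr, dc in relative_pos` loop with the `break` once adj_rolls > 3
def pvAdjLoop (grid : List (List String)) (rows cols row col : Nat) :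
    List (Int × Int) → Int → Int
  | [], adj => adj
  | (dr, dc) :: rest, adj =>
    if 0 ≤ (row : Int) + dr ∧ (row : Int) + dr < (rows : Int) ∧
        0 ≤ (col : Int) + dc ∧ (col : Int) + dc < (cols : Int) then
      if pvCell grid ((row : Int) + dr) ((col : Int) + dc) == "@" then
        if adj + 1 > 3 then adj + 1
        else pvAdjLoop grid rows cols row col rest (adj + 1)
      else pvAdjLoop grid rows cols row col rest adj
    else pvAdjLoop grid rows cols row col rest adj

def find_rolls (grid : List (List String)) : Int × (List (Int × Int)) :=
  let rows := grid.length
  let cols := (grid.headD []).length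
  (List.range rows).foldl (fun st (row : Nat) =>
    (List.range cols).foldl (fun st (col : Nat) =>
      if pvCell grid (row : Int) (col : Int) == "@" then
        if pvAdjLoop grid rows cols row col pvOffsets 0 < 4 then
          (st.1 + 1, st.2 ++ [((row : Int), (col : Int))])
        else st
      else st) st) ((0 : Int), ([] : List (Int × Int)))

-- ===== PORT B =====
-- B's first pass: scatter +1 into a dict at every in-bounds neighbour of every "@" cell
def pvScatter (grid : List (List String)) (rows cols : Nat) : PySem.Dict (Int × Int) Int :=
  (List.range rows).foldl (fun d (r : Nat) =>
    (List.range cols).foldl (fun d (c : Nat) =>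
      if pvCell grid (r : Int) (c : Int) == "@" then
        pvOffsets.foldl (fun d p =>
          if 0 ≤ (r : Int) + p.1 ∧ (r : Int) + p.1 < (rows : Int) ∧
              0 ≤ (c : Int) + p.2 ∧ (c : Int) + p.2 < (cols : Int) then
            d.insert ((r : Int) + p.1, (c : Int) + p.2)
              (d.getD ((r : Int) + p.1, (c : Int) + p.2) 0 + 1)
          else d) d
      else d) d) PySem.Dict.empty

def find_rolls_alt (grid : List (List String)) : Int × (List (Int × Int)) :=
  let rows := grid.length
  let cols := (grid.headD []).length
  let counts := pvScatter grid rows cols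
  (List.range rows).foldl (fun st (r : Nat) =>
    (List.range cols).foldl (fun st (c : Nat) =>
      if pvCell grid (r : Int) (c : Int) == "@" ∧ counts.getD ((r : Int), (c : Int)) 0 < 4 then
        (st.1 + 1, st.2 ++ [((r : Int), (c : Int))])
      else st) st) ((0 : Int), ([] : List (Int × Int)))

-- ===== PRECONDITION & SPEC =====
-- Pre_ excludes exactly the inputs where Python A raises IndexError: the empty grid
-- (grid[0]) and grids with a row shorter than the first row (grid[row][col] with col < cols).
def Pre_find_rolls (grid : List (List String)) : Prop :=
  grid ≠ [] ∧ ∀ row ∈ grid, (grid.headD []).length ≤ row.length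

instance (grid : List (List String)) : Decidable (Pre_find_rolls grid) := by
  unfold Pre_find_rolls; infer_instance

def pvWitness_find_rolls : List (List String) := [["@", "."], [".", "@"]]

def Spec_find_rolls (grid : List (List String)) (out : Int × (List (Int × Int))) : Prop :=
  out = find_rolls_alt grid
instance (grid : List (List String)) (out : Int × (List (Int × Int))) : Decidable (Spec_find_rolls grid out) := by unfold Spec_find_rolls; infer_instance

-- ===== CLAIM (what is proved, stated in full; the proofs are below) =====
def Claim_equal_find_rolls : Prop := ∀ (grid : List (List String)), Dom_find_rolls grid → Pre_find_rolls grid → Spec_find_rolls grid (find_rolls grid)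

-- ===== LEMMAS AND PROOFS =====

-- "cell (a, b) is in bounds and holds '@'"
def pvAtB (grid : List (List String)) (rows cols : Nat) (a b : Int) : Bool :=
  decide (0 ≤ a ∧ a < (rows : Int) ∧ 0 ≤ b ∧ b < (cols : Int)) && (pvCell grid a b == "@")

-- number of '@' neighbours of (r, c): what A gathers and B scatters
def pvNbr (grid : List (List String)) (rows cols : Nat) (r c : Int) : Nat :=
  pvOffsets.countP (fun d => pvAtB grid rows cols (r + d.1) (c + d.2))

-- the flat list of keys B's scatter pass increments, in order
def pvKeys (grid : List (List String)) (rows cols : Nat) : List (Int × Int) :=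
  (List.range rows).flatMap (fun (r : Nat) =>
    (List.range cols).flatMap (fun (c : Nat) =>
      if pvCell grid (r : Int) (c : Int) == "@" then
        (pvOffsets.filter (fun p => decide (0 ≤ (r : Int) + p.1 ∧ (r : Int) + p.1 < (rows : Int) ∧
            0 ≤ (c : Int) + p.2 ∧ (c : Int) + p.2 < (cols : Int)))).map
          (fun p => ((r : Int) + p.1, (c : Int) + p.2))
      else []))

-- A's inner loop computes min(#-of-'@'-neighbours-so-far, 4)
theorem pvAdjLoop_eq (grid : List (List String)) (rows cols row col : Nat)
    (t : List (Int × Int)) (a : Int) (h0 : 0 ≤ a) (h3 : a ≤ 3) :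
    pvAdjLoop grid rows cols row col t a =
      min (a + (t.countP (fun d => pvAtB grid rows cols ((row : Int) + d.1) ((col : Int) + d.2)) : Int)) 4 := by
  induction t generalizing a with
  | nil => simp [pvAdjLoop]; omega
  | cons d t ih =>
    obtain ⟨dr, dc⟩ := d
    rw [pvAdjLoop, List.countP_cons]
    by_cases hb : 0 ≤ (row : Int) + dr ∧ (row : Int) + dr < (rows : Int) ∧
        0 ≤ (col : Int) + dc ∧ (col : Int) + dc < (cols : Int)
    · rw [if_pos hb]
      by_cases hc : pvCell grid ((row : Int) + dr) ((col : Int) + dc) == "@"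
      · rw [if_pos hc]
        have hA : pvAtB grid rows cols ((row : Int) + dr) ((col : Int) + dc) = true := by
          simp [pvAtB, hb, hc]
        by_cases h4 : a + 1 > 3
        · rw [if_pos h4]
          simp only [hA, if_true]
          push_cast
          omega
        · rw [if_neg h4, ih (a + 1) (by omega) (by omega)]
          simp only [hA, if_true]
          push_cast
          omega
      · rw [if_neg hc]
        have hc' : (pvCell grid ((row : Int) + dr) ((col : Int) + dc) == "@") = false := by
          simpa using hc
        have hA : pvAtB grid rows cols ((row : Int) + dr) ((col : Int) + dc) = false := by
          simp [pvAtB, hc']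
        rw [ih a h0 h3]
        simp [hA]
    · rw [if_neg hb]
      have hA : pvAtB grid rows cols ((row : Int) + dr) ((col : Int) + dc) = false := by
        simp only [pvAtB, Bool.and_eq_false_iff, decide_eq_false_iff_not]
        left; exact hb
      rw [ih a h0 h3]
      simp [hA]

-- B's nested scatter loops are one fold of +1-inserts over the flat key list
theorem pvScatter_flat (grid : List (List String)) (rows cols : Nat) :
    pvScatter grid rows cols =
      (pvKeys grid rows cols).foldl
        (fun d k => d.insert k (d.getD k 0 + 1)) PySem.Dict.empty := by
  unfold pvScatter pvKeys
  rw [List.foldl_flatMap]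
  refine PySem.List.foldl_congr_mem _ _ _ _ (fun d r _ => ?_)
  rw [List.foldl_flatMap]
  refine PySem.List.foldl_congr_mem _ _ _ _ (fun d c _ => ?_)
  split
  · rw [List.foldl_map, ← PySem.List.foldl_ite_eq_foldl_filter]
  · rfl

-- what the dict lookup of B's phase two returns: the multiplicity in the key list
theorem pvScatter_getD (grid : List (List String)) (rows cols : Nat) (q : Int × Int) :
    (pvScatter grid rows cols).getD q 0 = ((pvKeys grid rows cols).count q : Int) := by
  rw [pvScatter_flat, PySem.Dict.getD_foldl_insert_add_one]
  simp

-- sum over range of an indicator pinned to one (possibly out-of-range) integer index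
theorem pvSumIndicator (n : Nat) (a : Int) (g : Nat → Nat) :
    (∑ i ∈ Finset.range n, if (i : Int) = a then g i else 0)
      = if 0 ≤ a ∧ a < (n : Int) then g a.toNat else 0 := by
  by_cases h : 0 ≤ a ∧ a < (n : Int)
  · rw [if_pos h]
    have hcongr : ∀ i ∈ Finset.range n,
        (if (i : Int) = a then g i else 0) = if i = a.toNat then g i else 0 := by
      intro i _
      have : ((i : Int) = a) = (i = a.toNat) := by
        apply propext; omega
      simp only [this]
    rw [Finset.sum_congr rfl hcongr, Finset.sum_ite_eq' (Finset.range n) a.toNat g,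
      if_pos (Finset.mem_range.mpr (by omega))]
  · rw [if_neg h, Finset.sum_eq_zero]
    intro i hi
    rw [if_neg]
    have := Finset.mem_range.mp hi
    omega

-- double indicator sum over the whole grid collapses to one cell test
theorem pvDoubleSum (grid : List (List String)) (rows cols : Nat) (a b : Int) :
    (∑ r0 ∈ Finset.range rows, ∑ c0 ∈ Finset.range cols,
        (if (pvCell grid (r0 : Int) (c0 : Int) == "@") = true ∧ (r0 : Int) = a ∧ (c0 : Int) = b
          then 1 else 0))
      = if pvAtB grid rows cols a b = true then 1 else 0 := by
  have hpt : ∀ r0 c0 : Nat,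
      (if (pvCell grid (r0 : Int) (c0 : Int) == "@") = true ∧ (r0 : Int) = a ∧ (c0 : Int) = b
          then 1 else 0)
        = if (r0 : Int) = a then
            (if (c0 : Int) = b then (if (pvCell grid (r0 : Int) (c0 : Int) == "@") = true then 1 else 0) else 0)
          else 0 := by
    intro r0 c0; split_ifs <;> simp_all
  have hrow : ∀ r0 : Nat,
      (∑ c0 ∈ Finset.range cols,
        (if (pvCell grid (r0 : Int) (c0 : Int) == "@") = true ∧ (r0 : Int) = a ∧ (c0 : Int) = b
          then 1 else 0))
      = if (r0 : Int) = a then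
          (∑ c0 ∈ Finset.range cols,
            if (c0 : Int) = b then (if (pvCell grid (r0 : Int) (c0 : Int) == "@") = true then 1 else 0) else 0)
        else 0 := by
    intro r0
    rw [Finset.sum_congr rfl (fun c0 _ => hpt r0 c0)]
    split <;> simp
  rw [Finset.sum_congr rfl (fun r0 _ => hrow r0)]
  rw [pvSumIndicator rows a
      (fun r0 => ∑ c0 ∈ Finset.range cols,
        if (c0 : Int) = b then (if (pvCell grid (r0 : Int) (c0 : Int) == "@") = true then 1 else 0) else 0)]
  by_cases ha : 0 ≤ a ∧ a < (rows : Int)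
  · rw [if_pos ha, pvSumIndicator cols b
      (fun c0 => if (pvCell grid (a.toNat : Int) (c0 : Int) == "@") = true then 1 else 0)]
    by_cases hb : 0 ≤ b ∧ b < (cols : Int)
    · rw [if_pos hb]
      have hcell : pvCell grid ((a.toNat : Nat) : Int) ((b.toNat : Nat) : Int) = pvCell grid a b := by
        simp only [pvCell, Int.toNat_natCast]
      rw [hcell]
      have : pvAtB grid rows cols a b = (pvCell grid a b == "@") := by
        simp [pvAtB, ha.1, ha.2, hb.1, hb.2]
      simp only [this]
    · rw [if_neg hb]
      have : pvAtB grid rows cols a b = false := by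
        simp only [pvAtB, Bool.and_eq_false_iff, decide_eq_false_iff_not]
        left; intro hh; exact hb ⟨hh.2.2.1, hh.2.2.2⟩
      simp only [this]; simp
  · rw [if_neg ha]
    have : pvAtB grid rows cols a b = false := by
      simp only [pvAtB, Bool.and_eq_false_iff, decide_eq_false_iff_not]
      left; intro hh; exact ha ⟨hh.1, hh.2.1⟩
    rw [this]; simp

-- a List.sum over List.range is the corresponding Finset.range sum
theorem pvListSumRange (n : Nat) (f : Nat → Nat) :
    ((List.range n).map f).sum = ∑ i ∈ Finset.range n, f i := by
  rw [Finset.sum_eq_multiset_sum]; rfl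

-- per-cell contribution to B's key list, as a sum of per-offset indicators
theorem pvCellKeys (grid : List (List String)) (rows cols : Nat)
    (r c : Nat) (hr : r < rows) (hc : c < cols) (r0 c0 : Nat) :
    List.count ((r : Int), (c : Int))
      (if pvCell grid (r0 : Int) (c0 : Int) == "@" then
        (pvOffsets.filter (fun p => decide (0 ≤ (r0 : Int) + p.1 ∧ (r0 : Int) + p.1 < (rows : Int) ∧
            0 ≤ (c0 : Int) + p.2 ∧ (c0 : Int) + p.2 < (cols : Int)))).map
          (fun p => ((r0 : Int) + p.1, (c0 : Int) + p.2))
      else [])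
      = pvOffsets.countP (fun d =>
          decide ((pvCell grid (r0 : Int) (c0 : Int) == "@") = true ∧
              (r0 : Int) = (r : Int) - d.1 ∧ (c0 : Int) = (c : Int) - d.2)) := by
  by_cases hat : pvCell grid (r0 : Int) (c0 : Int) == "@"
  · rw [if_pos hat, List.count_eq_countP, List.countP_map, List.countP_filter]
    refine List.countP_congr (fun d _ => ?_)
    obtain ⟨d1, d2⟩ := d
    rw [Bool.eq_iff_iff]
    simp only [Function.comp_apply, Bool.and_eq_true, beq_iff_eq, Prod.mk.injEq,
      decide_eq_true_eq, hat, true_and, iff_true]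
    omega
  · rw [if_neg hat]
    simp [hat]

-- the multiplicity of cell (r, c) in B's key list is its '@'-neighbour count
theorem pvCount_eq_nbr (grid : List (List String)) (rows cols : Nat)
    (r c : Nat) (hr : r < rows) (hc : c < cols) :
    (pvKeys grid rows cols).count ((r : Int), (c : Int)) = pvNbr grid rows cols r c := by
  rw [pvKeys, List.count_flatMap]
  simp only [Function.comp_def, List.count_flatMap]
  simp only [pvCellKeys grid rows cols r c hr hc]
  simp only [pvOffsets, List.countP_cons, List.countP_nil, decide_eq_true_eq]
  simp only [pvListSumRange]
  simp only [Finset.sum_add_distrib, zero_add]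
  simp only [pvDoubleSum]
  simp only [pvNbr, pvOffsets, List.countP_cons, List.countP_nil]
  simp only [sub_neg_eq_add, sub_zero, add_zero, ← sub_eq_add_neg, zero_add]
  ac_rfl

-- the two double folds of the main/collection passes agree cell by cell
theorem pvFolds_eq (grid : List (List String)) :
    find_rolls grid = find_rolls_alt grid := by
  unfold find_rolls find_rolls_alt
  dsimp only
  refine PySem.List.foldl_congr_mem _ _ _ _ (fun st r hr => ?_)
  refine PySem.List.foldl_congr_mem _ _ _ _ (fun st c hc => ?_)
  have hrlt : r < grid.length := List.mem_range.mp hr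
  have hclt : c < (grid.headD []).length := List.mem_range.mp hc
  by_cases hat : pvCell grid (r : Int) (c : Int) == "@"
  · rw [if_pos hat]
    have hadj : pvAdjLoop grid grid.length (grid.headD []).length r c pvOffsets 0 =
        min ((pvNbr grid grid.length (grid.headD []).length r c : Int)) 4 := by
      rw [pvAdjLoop_eq _ _ _ _ _ _ _ le_rfl (by norm_num)]
      simp [pvNbr]
    have hgetD : (pvScatter grid grid.length (grid.headD []).length).getD ((r : Int), (c : Int)) 0 =
        (pvNbr grid grid.length (grid.headD []).length r c : Int) := by
      rw [pvScatter_getD, pvCount_eq_nbr grid _ _ r c hrlt hclt]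
    by_cases h4 : pvNbr grid grid.length (grid.headD []).length r c < 4
    · rw [if_pos, if_pos]
      · exact ⟨hat, by rw [hgetD]; exact_mod_cast h4⟩
      · rw [hadj]; omega
    · rw [if_neg, if_neg]
      · rintro ⟨-, hlt⟩
        rw [hgetD] at hlt
        exact h4 (by exact_mod_cast hlt)
      · rw [hadj]; omega
  · rw [if_neg hat, if_neg (fun h => hat h.1)]

-- ===== VERDICT (by name: the statement is the Claim_ definition above) =====
theorem find_rolls_spec : Claim_equal_find_rolls := by
  intro grid _ _
  unfold Spec_find_rolls
  exact pvFolds_eq grid
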